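-- pv_equiv track=rewrite | github.com/cchauve-canexia/BOVERI-557 | bin/alignments_utils.py | compute_alignment_MD
-- ===== SOURCE A (Python) =====
-- GAP = str('-')
--
-- def compute_alignment_MD(ref_seq, read_seq):
--     """
--     Computes the MD tag string of an alignment (ref, read)
--     :param: ref_seq, read_seq (str): aligned sequences
--     (ref: reference sequence, read: read sequence)
--     :return: int: MD tag string
--     """
--     # CIGAR symbol at every positions
--     alg_pos = range(len(read_seq))
--     MD, match_counter, current_state = '', 0, 'start'
--     for pos in alg_pos:
--         if ref_seq[pos] == read_seq[pos]: # match
--             match_counter += 1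
--             current_state = 'match'
--         elif read_seq[pos] != GAP and ref_seq[pos] != GAP: # mismatch
--             MD += f"{match_counter}{ref_seq[pos]}"
--             match_counter, current_state = 0, 'mismatch'
--         elif read_seq[pos] == GAP: # Deletion
--             if current_state != 'deletion':
--                 MD += f"{match_counter}^"
--             MD += ref_seq[pos]
--             match_counter, current_state = 0, 'deletion'
--     MD += (str(match_counter) if match_counter > 0 else '')
--     return MD
-- ===== SOURCE B (Python) =====
-- GAP = str('-')
--
--
-- def _classify(r, q):
--     """Classify one aligned column; None = insertion (ref gap), skipped."""
--     if r == q: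
--         return ('M', r)
--     if q != GAP and r != GAP:
--         return ('X', r)
--     if q == GAP:
--         return ('D', r)
--     return None
--
--
-- def compute_alignment_MD(ref_seq, read_seq):
--     # Pass 1: build a classification table of the alignment columns.
--     tokens = [t for t in (_classify(r, q) for r, q in zip(ref_seq, read_seq))
--               if t is not None]
--     # Pass 2: run-grouping emission.
--     parts, count, i, n = [], 0, 0, len(tokens)
--     while i < n:
--         kind, c = tokens[i]
--         if kind == 'M':
--             count += 1
--             i += 1
--         elif kind == 'X':
--             parts.append(f"{count}{c}")
--             count = 0
--             i += 1
--         else:  # maximal deletion run, '^' emitted once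
--             j = i + 1
--             while j < n and tokens[j][0] == 'D':
--                 j += 1
--             parts.append(f"{count}^" + ''.join(c2 for _, c2 in tokens[i:j]))
--             count = 0
--             i = j
--     if count > 0:
--         parts.append(str(count))
--     return ''.join(parts)
-- ===== Notes on version B (the rewrite author's own statement) =====
-- stated objective: alternative
-- what changed: Replaces A's single stateful scan (MD string, match counter, current-state flag) with two passes: a classification table of the alignment columns (match/mismatch/deletion, insertions dropped) followed by a run-grouping emission pass that consumes each maximal deletion run at once, joining parts at the end.
import Mathlib
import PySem

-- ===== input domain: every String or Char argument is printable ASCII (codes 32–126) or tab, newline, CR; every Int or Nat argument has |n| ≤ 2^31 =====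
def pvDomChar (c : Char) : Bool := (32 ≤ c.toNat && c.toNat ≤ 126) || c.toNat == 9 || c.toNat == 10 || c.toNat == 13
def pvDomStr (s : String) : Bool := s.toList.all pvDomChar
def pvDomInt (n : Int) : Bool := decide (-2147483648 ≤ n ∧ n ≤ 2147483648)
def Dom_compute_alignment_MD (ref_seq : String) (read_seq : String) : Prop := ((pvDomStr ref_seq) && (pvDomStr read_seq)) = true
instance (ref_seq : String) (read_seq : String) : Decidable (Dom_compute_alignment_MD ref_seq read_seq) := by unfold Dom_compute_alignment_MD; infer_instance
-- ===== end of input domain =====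

-- B re-decomposes A's stateful single pass into a classification table plus a run-grouping
-- emission pass (objective: alternative decomposition, same linear cost).

-- ===== PORT A =====
-- A's loop body ('for pos in range(len(read_seq))'): state = (MD, match_counter, current_state).
def pvStepA (st : List Char × Int × String) (rc qc : Char) : List Char × Int × String :=
  if rc == qc then (st.1, st.2.1 + 1, "match")
  else if qc != '-' && rc != '-' then
    (st.1 ++ PySem.Int.toChars st.2.1 ++ [rc], 0, "mismatch")
  else if qc == '-' then
    ((if st.2.2 != "deletion" then st.1 ++ PySem.Int.toChars st.2.1 ++ ['^'] else st.1) ++ [rc], 0, "deletion")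
  else st

def compute_alignment_MD (ref_seq : String) (read_seq : String) : String :=
  let ref := ref_seq.toList
  let read := read_seq.toList
  let st := (PySem.List.pyRange 0 (read.length : Int) 1).foldl
    (fun st pos => pvStepA st (PySem.List.pyGetD ref pos ' ') (PySem.List.pyGetD read pos ' '))
    ([], 0, "start")
  String.ofList (st.1 ++ (if st.2.1 > 0 then PySem.Int.toChars st.2.1 else []))

-- ===== PORT B =====
-- B's `_classify`: 'M' match, 'X' mismatch, 'D' deletion, none = insertion (skipped).
def pvClassify (p : Char × Char) : Option (Char × Char) :=
  if p.1 == p.2 then some ('M', p.1)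
  else if p.2 != '-' && p.1 != '-' then some ('X', p.1)
  else if p.2 == '-' then some ('D', p.1)
  else none

-- B's emission while-loop: the inner run scan 'while j < n and tokens[j][0] == D' is
-- takeWhile/dropWhile; 'count' is the running match count.
def pvEmit : List (Char × Char) → Int → List Char
  | [], count => if count > 0 then PySem.Int.toChars count else []
  | (k, c) :: rest, count =>
    if k == 'M' then pvEmit rest (count + 1)
    else if k == 'X' then PySem.Int.toChars count ++ [c] ++ pvEmit rest 0
    else PySem.Int.toChars count ++ ['^'] ++ (c :: (rest.takeWhile (fun t => t.1 == 'D')).map (·.2))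
           ++ pvEmit (rest.dropWhile (fun t => t.1 == 'D')) 0
  termination_by ts _ => ts.length
  decreasing_by
    all_goals simp
    all_goals (have := rest.length_dropWhile_le (fun t => t.1 == 'D'); omega)

def compute_alignment_MD_alt (ref_seq : String) (read_seq : String) : String :=
  String.ofList (pvEmit ((ref_seq.toList.zip read_seq.toList).filterMap pvClassify) 0)

-- ===== PRECONDITION & SPEC =====
-- A indexes ref_seq[pos] for every pos < len(read_seq), so it raises IndexError iff the read
-- is longer than the reference; Pre_ admits exactly the inputs on which A returns.
def Pre_compute_alignment_MD (ref_seq : String) (read_seq : String) : Prop :=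
  read_seq.toList.length ≤ ref_seq.toList.length
instance (ref_seq : String) (read_seq : String) : Decidable (Pre_compute_alignment_MD ref_seq read_seq) := by unfold Pre_compute_alignment_MD; infer_instance
def pvWitness_compute_alignment_MD : String × String := ("ACGT-A", "AG-TCA")

def Spec_compute_alignment_MD (ref_seq : String) (read_seq : String) (out : String) : Prop := out = compute_alignment_MD_alt ref_seq read_seq
instance (ref_seq : String) (read_seq : String) (out : String) : Decidable (Spec_compute_alignment_MD ref_seq read_seq out) := by unfold Spec_compute_alignment_MD; infer_instance

-- ===== CLAIM (what is proved, stated in full; the proofs are below) =====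
def Claim_equal_compute_alignment_MD : Prop := ∀ (ref_seq : String) (read_seq : String), Dom_compute_alignment_MD ref_seq read_seq → Pre_compute_alignment_MD ref_seq read_seq → Spec_compute_alignment_MD ref_seq read_seq (compute_alignment_MD ref_seq read_seq)

-- ===== LEMMAS AND PROOFS =====

-- A's token-level step: what pvStepA does on a classified (kind, ref-char) token.
def pvTokStep (st : List Char × Int × String) (t : Char × Char) : List Char × Int × String :=
  if t.1 == 'M' then (st.1, st.2.1 + 1, "match")
  else if t.1 == 'X' then (st.1 ++ PySem.Int.toChars st.2.1 ++ [t.2], 0, "mismatch")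
  else ((if st.2.2 != "deletion" then st.1 ++ PySem.Int.toChars st.2.1 ++ ['^'] else st.1) ++ [t.2], 0, "deletion")

lemma pvStepA_eq_tokStep (st : List Char × Int × String) (r q : Char) :
    pvStepA st r q = match pvClassify (r, q) with
      | some t => pvTokStep st t
      | none => st := by
  unfold pvStepA pvClassify pvTokStep
  by_cases h1 : r = q
  · simp [h1]
  · by_cases hq : q = '-'
    · subst hq; simp [h1]
    · by_cases hr : r = '-'
      · subst hr; simp [h1, hq]
      · simp [h1, hq, hr]

lemma pvFoldA_eq_tok :
    ∀ (l : List (Char × Char)) (st : List Char × Int × String),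
      l.foldl (fun st p => pvStepA st p.1 p.2) st = (l.filterMap pvClassify).foldl pvTokStep st := by
  intro l
  induction l with
  | nil => intro st; simp
  | cons p ps ih =>
    obtain ⟨a, b⟩ := p
    intro st
    rw [List.foldl_cons, pvStepA_eq_tokStep, List.filterMap_cons]
    cases h : pvClassify (a, b) with
    | none => exact ih st
    | some t => rw [List.foldl_cons]; exact ih (pvTokStep st t)

-- indexing loop over range(len(read)) = fold over the zipped pairs (read no longer than ref)
lemma pvFold_range_eq_zip {S : Type} (F : S → Char → Char → S) :
    ∀ (read ref : List Char) (st : S), read.length ≤ ref.length →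
      (List.range read.length).foldl (fun st k => F st (ref.getD k ' ') (read.getD k ' ')) st
        = (ref.zip read).foldl (fun st p => F st p.1 p.2) st := by
  intro read
  induction read with
  | nil => intro ref st _; simp
  | cons q qs ih =>
    intro ref st hlen
    cases ref with
    | nil => simp at hlen
    | cons r rs =>
      simp only [List.length_cons, List.range_succ_eq_map, List.foldl_cons, List.foldl_map,
        List.getD_cons_zero, List.getD_cons_succ, List.zip_cons_cons]
      exact ih rs (F st r q) (by simpa using hlen)

lemma pvClassify_kind {l : List (Char × Char)} {t : Char × Char}
    (ht : t ∈ l.filterMap pvClassify) : t.1 = 'M' ∨ t.1 = 'X' ∨ t.1 = 'D' := by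
  rcases List.mem_filterMap.mp ht with ⟨p, -, hp⟩
  unfold pvClassify at hp
  split_ifs at hp
  · rw [← Option.some_inj.mp hp]; simp
  · rw [← Option.some_inj.mp hp]; simp
  · rw [← Option.some_inj.mp hp]; simp

-- a maximal deletion run processed from the 'deletion' state just appends the ref chars
lemma pvFold_delRun (run : List (Char × Char)) (hrun : ∀ t ∈ run, t.1 = 'D')
    (MD : List Char) :
    run.foldl pvTokStep (MD, 0, "deletion") = (MD ++ run.map (·.2), 0, "deletion") := by
  induction run generalizing MD with
  | nil => simp
  | cons t ts ih =>
    have hk := hrun t (List.mem_cons_self)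
    have hstep : pvTokStep (MD, 0, "deletion") t = (MD ++ [t.2], 0, "deletion") := by
      unfold pvTokStep; simp [hk]
    simp only [List.foldl_cons, hstep, ih (fun u hu => hrun u (List.mem_cons_of_mem _ hu))]
    simp

def pvFinal (st : List Char × Int × String) : List Char :=
  st.1 ++ (if st.2.1 > 0 then PySem.Int.toChars st.2.1 else [])

-- main invariant: A's token fold with accumulated MD equals MD ++ B's run-grouping emission
lemma pvFold_eq_emit :
    ∀ (n : Nat) (tokens : List (Char × Char)), tokens.length ≤ n →
      (∀ t ∈ tokens, t.1 = 'M' ∨ t.1 = 'X' ∨ t.1 = 'D') →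
      ∀ (MD : List Char) (mc : Int) (cs : String),
        (cs = "deletion" → ∀ t, tokens.head? = some t → t.1 ≠ 'D') →
        pvFinal (tokens.foldl pvTokStep (MD, mc, cs)) = MD ++ pvEmit tokens mc := by
  intro n
  induction n with
  | zero =>
    intro tokens hlen _ MD mc cs _
    have : tokens = [] := List.eq_nil_of_length_eq_zero (Nat.le_zero.mp hlen)
    subst this
    simp [pvFinal, pvEmit]
  | succ n ih =>
    intro tokens hlen hkinds MD mc cs hcs
    cases tokens with
    | nil => simp [pvFinal, pvEmit]
    | cons t rest =>
      obtain ⟨k, c⟩ := t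
      rcases hkinds (k, c) (List.mem_cons_self) with hk | hk | hk
      · -- match
        subst hk
        have hstep : pvTokStep (MD, mc, cs) ('M', c) = (MD, mc + 1, "match") := by
          unfold pvTokStep; simp
        rw [List.foldl_cons, hstep,
          ih rest (by simpa using hlen) (fun u hu => hkinds u (List.mem_cons_of_mem _ hu))
            MD (mc + 1) "match" (by intro h; simp at h)]
        rw [pvEmit]
        simp
      · -- mismatch
        subst hk
        have hstep : pvTokStep (MD, mc, cs) ('X', c)
            = (MD ++ PySem.Int.toChars mc ++ [c], 0, "mismatch") := by
          unfold pvTokStep; simp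
        rw [List.foldl_cons, hstep,
          ih rest (by simpa using hlen) (fun u hu => hkinds u (List.mem_cons_of_mem _ hu))
            (MD ++ PySem.Int.toChars mc ++ [c]) 0 "mismatch" (by intro h; simp at h)]
        rw [pvEmit]
        simp
      · -- deletion
        subst hk
        have hcs' : cs ≠ "deletion" := fun h => hcs h ('D', c) rfl rfl
        have hstep : pvTokStep (MD, mc, cs) ('D', c)
            = (MD ++ PySem.Int.toChars mc ++ ['^'] ++ [c], 0, "deletion") := by
          unfold pvTokStep; simp [hcs']
        have hsplit : rest = rest.takeWhile (fun t => t.1 == 'D')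
            ++ rest.dropWhile (fun t => t.1 == 'D') := (List.takeWhile_append_dropWhile).symm
        have htake : ∀ u ∈ rest.takeWhile (fun t => t.1 == 'D'), u.1 = 'D' := by
          intro u hu
          simpa using List.mem_takeWhile_imp hu
        have hdropKinds : ∀ u ∈ rest.dropWhile (fun t => t.1 == 'D'),
            u.1 = 'M' ∨ u.1 = 'X' ∨ u.1 = 'D' := fun u hu =>
          hkinds u (List.mem_cons_of_mem _ ((List.dropWhile_sublist _).subset hu))
        have hdropHead : ∀ u, (rest.dropWhile (fun t => t.1 == 'D')).head? = some u → u.1 ≠ 'D' := by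
          intro u hu
          have h2 := List.head?_dropWhile_not (fun t => t.1 == 'D') rest
          rw [hu] at h2; simpa using h2
        rw [List.foldl_cons, hstep]
        conv_lhs => rw [hsplit, List.foldl_append]
        rw [pvFold_delRun _ htake,
          ih (rest.dropWhile (fun t => t.1 == 'D'))
            (by have := rest.length_dropWhile_le (fun t => t.1 == 'D'); simp at hlen; omega)
            hdropKinds _ 0 "deletion" (fun _ u hu => hdropHead u hu)]
        rw [pvEmit]
        simp

-- ===== VERDICT (by name: the statement is the Claim_ definition above) =====
theorem compute_alignment_MD_spec : Claim_equal_compute_alignment_MD := by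
  intro ref_seq read_seq _ hpre
  unfold Spec_compute_alignment_MD compute_alignment_MD compute_alignment_MD_alt
  simp only
  rw [PySem.List.pyRange_zero_nat, List.foldl_map]
  simp only [PySem.List.pyGetD_natCast]
  rw [pvFold_range_eq_zip (fun st r q => pvStepA st r q) read_seq.toList ref_seq.toList _ hpre]
  rw [pvFoldA_eq_tok]
  have hmain := pvFold_eq_emit ((ref_seq.toList.zip read_seq.toList).filterMap pvClassify).length
    ((ref_seq.toList.zip read_seq.toList).filterMap pvClassify) le_rfl
    (fun t ht => pvClassify_kind ht) [] 0 "start" (by intro h; simp at h)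
  unfold pvFinal at hmain
  rw [hmain]
  simp
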